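-- pv_equiv track=rewrite | github.com/molleer/adventofcode2024 | day21/day21.py | pass_illegal
-- ===== SOURCE A (Python) =====
-- from typing import Dict, List, Tuple
--
-- def pass_illegal(pos, path, illegal: List[Tuple[int, int]]) -> bool:
--     if pos in illegal:
--         return True
--     if path == "":
--         return False
--
--     if path[0] == "<":
--         return pass_illegal((pos[0] - 1, pos[1]), path[1:], illegal)
--     if path[0] == ">":
--         return pass_illegal((pos[0] + 1, pos[1]), path[1:], illegal)
--     if path[0] == "v":
--         return pass_illegal((pos[0], pos[1] + 1), path[1:], illegal)
--     if path[0] == "^":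
--         return pass_illegal((pos[0], pos[1] - 1), path[1:], illegal)
--
--     raise ValueError(path[0])
-- ===== SOURCE B (Python) =====
-- def pass_illegal(pos, path, illegal):
--     for ch in path:
--         if pos in illegal:
--             return True
--         if ch == "<":
--             pos = (pos[0] - 1, pos[1])
--         elif ch == ">":
--             pos = (pos[0] + 1, pos[1])
--         elif ch == "v":
--             pos = (pos[0], pos[1] + 1)
--         elif ch == "^":
--             pos = (pos[0], pos[1] - 1)
--         else:
--             raise ValueError(ch)
--     return pos in illegal
-- ===== Notes on version B (the rewrite author's own statement) =====
-- stated objective: idiomatic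
-- what changed: Replaced the tail recursion that threads the position through recursive calls with a single iterative for-loop over the characters maintaining the position explicitly, with one final membership check after the loop; B raises ValueError at exactly the same inputs as A.
import Mathlib
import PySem

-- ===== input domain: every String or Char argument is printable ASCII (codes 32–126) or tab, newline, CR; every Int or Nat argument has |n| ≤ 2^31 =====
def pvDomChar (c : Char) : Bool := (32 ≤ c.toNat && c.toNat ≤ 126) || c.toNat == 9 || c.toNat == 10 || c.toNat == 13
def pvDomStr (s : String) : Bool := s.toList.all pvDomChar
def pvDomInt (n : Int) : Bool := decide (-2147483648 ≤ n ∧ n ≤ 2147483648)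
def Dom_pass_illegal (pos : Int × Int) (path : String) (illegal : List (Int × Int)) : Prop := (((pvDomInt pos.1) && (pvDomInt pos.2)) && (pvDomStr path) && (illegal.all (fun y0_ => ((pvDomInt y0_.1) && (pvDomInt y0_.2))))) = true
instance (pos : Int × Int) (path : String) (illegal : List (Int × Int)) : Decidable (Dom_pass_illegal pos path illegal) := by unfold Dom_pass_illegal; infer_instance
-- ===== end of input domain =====

-- ===== PORT A =====
-- B replaces A's recursion with an iterative loop over the characters (same return value; neither mutates its arguments).

-- A: recursion on the path, checking membership before dispatching on the first character.
-- The ValueError branch (an unknown character reached) is excluded by Pre_ and ported as `false`.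
def passIllegalRecA (pos : Int × Int) (path : List Char) (illegal : List (Int × Int)) : Bool :=
  if pos ∈ illegal then true
  else
    match path with
    | [] => false
    | c :: rest =>
      if c = '<' then passIllegalRecA (pos.1 - 1, pos.2) rest illegal
      else if c = '>' then passIllegalRecA (pos.1 + 1, pos.2) rest illegal
      else if c = 'v' then passIllegalRecA (pos.1, pos.2 + 1) rest illegal
      else if c = '^' then passIllegalRecA (pos.1, pos.2 - 1) rest illegal
      else false  -- raise ValueError(path[0]) : unreachable under Pre_

def pass_illegal (pos : Int × Int) (path : String) (illegal : List (Int × Int)) : Bool :=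
  passIllegalRecA pos path.toList illegal

-- ===== PORT B =====
-- B's loop body: `none` encodes the early `return True`; otherwise the running position.
-- The `raise ValueError` branch (unknown character) is excluded by Pre_ and ported as keeping `pos`.
def passIllegalStepB (illegal : List (Int × Int)) (st : Option (Int × Int)) (ch : Char) : Option (Int × Int) :=
  match st with
  | none => none
  | some pos =>
    if pos ∈ illegal then none
    else if ch = '<' then some (pos.1 - 1, pos.2)
    else if ch = '>' then some (pos.1 + 1, pos.2)
    else if ch = 'v' then some (pos.1, pos.2 + 1)
    else if ch = '^' then some (pos.1, pos.2 - 1)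
    else some pos  -- raise ValueError(ch) : unreachable under Pre_

def pass_illegal_alt (pos : Int × Int) (path : String) (illegal : List (Int × Int)) : Bool :=
  match path.toList.foldl (passIllegalStepB illegal) (some pos) with
  | none => true
  | some p => decide (p ∈ illegal)

-- ===== PRECONDITION & SPEC =====
-- x/y displacement of one move character (0 for an unknown character, which Pre_ only
-- mentions at positions preceded by an illegal hit).
def pvMoveOk (c : Char) : Bool := c = '<' || c = '>' || c = 'v' || c = '^'
def pvDX (c : Char) : Int := if c = '<' then -1 else if c = '>' then 1 else 0
def pvDY (c : Char) : Int := if c = 'v' then 1 else if c = '^' then -1 else 0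

-- Pre_ excludes exactly the inputs on which A raises ValueError (and B raises the same):
-- it asks that every unknown character in the path be preceded (at or before its index) by a
-- visited position lying in `illegal`, the visited positions being pos plus the prefix sums
-- of the move displacements; on every input where A returns, Pre_ holds.
def Pre_pass_illegal (pos : Int × Int) (path : String) (illegal : List (Int × Int)) : Prop :=
  ((List.range path.toList.length).all (fun i =>
    pvMoveOk (path.toList.getD i ' ') ||
    (List.range (i + 1)).any (fun j =>
      decide ((pos.1 + ((path.toList.take j).map pvDX).sum,
               pos.2 + ((path.toList.take j).map pvDY).sum) ∈ illegal)))) = true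

instance (pos : Int × Int) (path : String) (illegal : List (Int × Int)) : Decidable (Pre_pass_illegal pos path illegal) := by unfold Pre_pass_illegal; infer_instance

def pvWitness_pass_illegal : (Int × Int) × String × (List (Int × Int)) := ((0, 0), "<v>^", [(-1, 1)])

def Spec_pass_illegal (pos : Int × Int) (path : String) (illegal : List (Int × Int)) (out : Bool) : Prop := out = pass_illegal_alt pos path illegal
instance (pos : Int × Int) (path : String) (illegal : List (Int × Int)) (out : Bool) : Decidable (Spec_pass_illegal pos path illegal out) := by unfold Spec_pass_illegal; infer_instance

-- ===== CLAIM (what is proved, stated in full; the proofs are below) =====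
def Claim_equal_pass_illegal : Prop := ∀ (pos : Int × Int) (path : String) (illegal : List (Int × Int)), Dom_pass_illegal pos path illegal → Pre_pass_illegal pos path illegal → Spec_pass_illegal pos path illegal (pass_illegal pos path illegal)

-- ===== LEMMAS AND PROOFS =====

theorem foldl_stepB_none (illegal : List (Int × Int)) (l : List Char) :
    l.foldl (passIllegalStepB illegal) none = none := by
  induction l with
  | nil => rfl
  | cons c rest ih => simpa [passIllegalStepB] using ih

theorem passIllegal_agree (illegal : List (Int × Int)) (l : List Char) (pos : Int × Int)
    (h : ∀ i < l.length, pvMoveOk (l.getD i ' ') = false →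
      ∃ j ≤ i, (pos.1 + ((l.take j).map pvDX).sum, pos.2 + ((l.take j).map pvDY).sum) ∈ illegal) :
    passIllegalRecA pos l illegal =
      (match l.foldl (passIllegalStepB illegal) (some pos) with
        | none => true
        | some p => decide (p ∈ illegal)) := by
  induction l generalizing pos with
  | nil =>
    by_cases hm : pos ∈ illegal <;> simp [passIllegalRecA, hm]
  | cons c rest ih =>
    by_cases hm : pos ∈ illegal
    · simp [passIllegalRecA, hm, passIllegalStepB, foldl_stepB_none]
    · by_cases hc : pvMoveOk c = true
      · -- c is a valid move; both sides step to the same new position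
        have hv : c = '<' ∨ c = '>' ∨ c = 'v' ∨ c = '^' := by
          simp [pvMoveOk] at hc; tauto
        have hrest : ∀ i < rest.length, pvMoveOk (rest.getD i ' ') = false →
            ∃ j ≤ i, (pos.1 + pvDX c + ((rest.take j).map pvDX).sum,
                      pos.2 + pvDY c + ((rest.take j).map pvDY).sum) ∈ illegal := by
          intro i hi hbad
          obtain ⟨j, hj, hmem⟩ := h (i + 1) (by simpa using Nat.succ_lt_succ hi)
            (by simpa using hbad)
          match j, hj with
          | 0, _ => exact absurd (by simpa using hmem) hm
          | j' + 1, hj =>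
            refine ⟨j', by omega, ?_⟩
            rw [List.take_succ_cons, List.map_cons, List.sum_cons, List.map_cons,
              List.sum_cons, ← add_assoc, ← add_assoc] at hmem
            exact hmem
        rcases hv with hv | hv | hv | hv <;> subst hv <;>
          · simp only [passIllegalRecA, List.foldl_cons, passIllegalStepB, if_neg hm]
            simp only [reduceIte]
            refine ih _ ?_
            intro i hi hbad
            obtain ⟨j, hj, hm2⟩ := hrest i hi hbad
            refine ⟨j, hj, ?_⟩
            convert hm2 using 3
            simp [pvDX, pvDY]
      · -- c invalid: h at i = 0 forces pos ∈ illegal, contradiction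
        obtain ⟨j, hj, hmem⟩ := h 0 (by simp) (by simpa using hc)
        interval_cases j
        exact absurd (by simpa using hmem) hm

theorem pre_forall (pos : Int × Int) (path : String) (illegal : List (Int × Int))
    (hpre : Pre_pass_illegal pos path illegal) :
    ∀ i < path.toList.length, pvMoveOk (path.toList.getD i ' ') = false →
      ∃ j ≤ i, (pos.1 + ((path.toList.take j).map pvDX).sum,
                pos.2 + ((path.toList.take j).map pvDY).sum) ∈ illegal := by
  intro i hi hbad
  unfold Pre_pass_illegal at hpre
  rw [List.all_eq_true] at hpre
  have := hpre i (List.mem_range.mpr hi)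
  rw [Bool.or_eq_true, List.any_eq_true] at this
  rcases this with h1 | ⟨j, hjm, hj⟩
  · rw [h1] at hbad; exact Bool.noConfusion hbad
  · exact ⟨j, by have := List.mem_range.mp hjm; omega, of_decide_eq_true hj⟩

-- ===== VERDICT (by name: the statement is the Claim_ definition above) =====
theorem pass_illegal_spec : Claim_equal_pass_illegal := by
  intro pos path illegal _hdom hpre
  unfold Spec_pass_illegal pass_illegal pass_illegal_alt
  exact passIllegal_agree illegal path.toList pos (pre_forall pos path illegal hpre)
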